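-- pv_equiv track=rewrite | github.com/vimkim/algorithms | programmers/learn-courses-30-lessons-64062/main.py | binRight
-- ===== SOURCE A (Python) =====
-- def binRight(val, left, right, stones):
--     if left == right:
--         return left
--     mid = (left + right) // 2
--     midVal = lowerboundK(stones, mid)
--
--     if val < midVal:
--         return binRight(val, left, mid, stones)
--     else:
--         return binRight(val, mid+1, right, stones)
--
-- def lowerboundK(stones, people):
--     people -= 1
--     stones = [stone - people for stone in stones]
--     maxCount = 0
--     count = 0
--     for stone in stones:
--         if stone <= 0:
--             count += 1
--             maxCount = max(maxCount, count)
--         else: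
--             count = 0
--     return maxCount+1
-- ===== SOURCE B (Python) =====
-- def binRight(val, left, right, stones):
--     lo, hi = left, right
--     while lo < hi:
--         mid = (lo + hi) // 2
--         if val < lowerboundK(stones, mid):
--             hi = mid
--         else:
--             lo = mid + 1
--     return lo
--
--
-- def lowerboundK(stones, people):
--     # staged: first collect the lengths of maximal runs of stones strictly
--     # below `people`, then take the largest (0 if there are none)
--     runs = _runLengths(stones, people)
--     best = 0
--     for r in runs:
--         best = max(best, r)
--     return best + 1
--
--
-- def _runLengths(stones, people):
--     runs = []
--     cur = 0
--     for s in stones: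
--         if s < people:
--             cur += 1
--         else:
--             if cur != 0:
--                 runs.append(cur)
--             cur = 0
--     if cur != 0:
--         runs.append(cur)
--     return runs
-- ===== Notes on version B (the rewrite author's own statement) =====
-- stated objective: alternative
-- what changed: The recursion becomes an iterative lo/hi while-loop, and lowerboundK is decomposed into two stages (collect maximal run lengths of stones below the threshold, then take their maximum) instead of A's single fold with a running max over a shifted copy of the list.
import Mathlib
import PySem

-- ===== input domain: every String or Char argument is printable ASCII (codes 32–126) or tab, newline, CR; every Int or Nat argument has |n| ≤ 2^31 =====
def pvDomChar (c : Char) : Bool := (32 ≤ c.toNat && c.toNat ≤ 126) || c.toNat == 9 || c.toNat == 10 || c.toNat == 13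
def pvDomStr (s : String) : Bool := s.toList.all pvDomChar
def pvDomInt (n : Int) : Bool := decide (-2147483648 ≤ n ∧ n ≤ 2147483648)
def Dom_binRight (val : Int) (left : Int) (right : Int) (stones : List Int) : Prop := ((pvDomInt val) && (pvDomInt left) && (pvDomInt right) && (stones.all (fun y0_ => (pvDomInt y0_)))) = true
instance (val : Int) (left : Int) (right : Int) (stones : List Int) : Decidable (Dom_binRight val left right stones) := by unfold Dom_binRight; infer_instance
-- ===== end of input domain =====

-- B replaces A's recursion by an iterative lo/hi while-loop and decomposes
-- lowerboundK into two stages: collect run lengths, then take their maximum.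

-- ===== PORT A =====
-- lowerboundK: people -= 1; map stone - people; fold (maxCount, count)
def lowerboundK (stones : List Int) (people : Int) : Int :=
  let p := people - 1
  let shifted := stones.map (fun stone => stone - p)
  let r := shifted.foldl (fun (acc : Int × Int) stone =>
    if stone ≤ 0 then
      let count := acc.2 + 1
      (max acc.1 count, count)
    else (acc.1, 0)) (0, 0)
  r.1 + 1

-- termination facts for binRight's recursion (named so the port can cite them)
lemma floordivTwo (b : Int) : PySem.Int.floordiv b 2 = b / 2 := by
  show Int.fdiv _ _ = _
  rw [Int.fdiv_eq_ediv, if_pos (Or.inl (by decide : (0 : Int) ≤ 2)), sub_zero]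

lemma midDecLeft (l r : Int) (h : l < r) :
    (PySem.Int.floordiv (l + r) 2 - l).toNat < (r - l).toNat := by
  have hdr : (l + r) / 2 < r :=
    (Int.ediv_lt_iff_lt_mul (by decide : (0 : Int) < 2)).mpr
      (lt_of_lt_of_eq (add_lt_add_left h r) (by rw [mul_comm, two_mul]))
  rw [floordivTwo, Int.toNat_lt_toNat (sub_pos.mpr h)]
  exact sub_lt_sub_right hdr l

lemma midDecRight (l r : Int) (h : l < r) :
    (r - (PySem.Int.floordiv (l + r) 2 + 1)).toNat < (r - l).toNat := by
  have hld : l ≤ (l + r) / 2 :=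
    (Int.le_ediv_iff_mul_le (by decide : (0 : Int) < 2)).mpr
      ((mul_two l).trans_le (add_le_add le_rfl h.le))
  rw [floordivTwo, Int.toNat_lt_toNat (sub_pos.mpr h)]
  exact sub_lt_sub_left (Int.lt_add_one_iff.mpr hld) r

-- binRight: A's recursion; the `else left` branch covers left = right exactly as Python,
-- and (totality guard only) left > right, where the Python recursion does not return.
def binRight (val : Int) (left : Int) (right : Int) (stones : List Int) : Int :=
  if h : left < right then
    let mid := PySem.Int.floordiv (left + right) 2
    let midVal := lowerboundK stones mid
    if val < midVal then binRight val left mid stones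
    else binRight val (mid + 1) right stones
  else left
termination_by (right - left).toNat
decreasing_by
  · exact midDecLeft left right h
  · exact midDecRight left right h

-- ===== PORT B =====
-- _runLengths: the list of lengths of maximal runs of stones strictly below `people`
def runLengths (stones : List Int) (people : Int) : List Int :=
  let st := stones.foldl (fun (acc : List Int × Int) s =>
    if s < people then (acc.1, acc.2 + 1)
    else if acc.2 ≠ 0 then (acc.1 ++ [acc.2], 0)
    else (acc.1, 0)) ([], 0)
  if st.2 ≠ 0 then st.1 ++ [st.2] else st.1

-- lowerboundK, second stage: the maximum run length (0 when there is none), plus 1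
def lowerboundK_alt (stones : List Int) (people : Int) : Int :=
  (runLengths stones people).foldl (fun best r => max best r) 0 + 1

-- the while-loop, ported with explicit fuel; (hi - lo).toNat steps always suffice
-- because the interval shrinks by at least one each iteration
def briLoop (fuel : Nat) (val : Int) (lo : Int) (hi : Int) (stones : List Int) : Int :=
  match fuel with
  | 0 => lo
  | fuel + 1 =>
    if lo < hi then
      let mid := PySem.Int.floordiv (lo + hi) 2
      if val < lowerboundK_alt stones mid then briLoop fuel val lo mid stones
      else briLoop fuel val (mid + 1) hi stones
    else lo

def binRight_alt (val : Int) (left : Int) (right : Int) (stones : List Int) : Int :=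
  briLoop (right - left).toNat val left right stones

-- ===== PRECONDITION & SPEC =====
-- Pre_ excludes left > right, on which the Python A recurses without converging (RecursionError).
def Pre_binRight (val : Int) (left : Int) (right : Int) (stones : List Int) : Prop :=
  left ≤ right
instance (val : Int) (left : Int) (right : Int) (stones : List Int) : Decidable (Pre_binRight val left right stones) := by unfold Pre_binRight; infer_instance
def pvWitness_binRight : Int × Int × Int × List Int := (2, 1, 5, [3, 1, 4])

def Spec_binRight (val : Int) (left : Int) (right : Int) (stones : List Int) (out : Int) : Prop := out = binRight_alt val left right stones
instance (val : Int) (left : Int) (right : Int) (stones : List Int) (out : Int) : Decidable (Spec_binRight val left right stones out) := by unfold Spec_binRight; infer_instance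

-- ===== CLAIM (what is proved, stated in full; the proofs are below) =====
def Claim_equal_binRight : Prop := ∀ (val : Int) (left : Int) (right : Int) (stones : List Int), Dom_binRight val left right stones → Pre_binRight val left right stones → Spec_binRight val left right stones (binRight val left right stones)

-- ===== LEMMAS AND PROOFS =====

lemma foldl_max_nonneg (rs : List Int) (i : Int) (h : 0 ≤ i) :
    0 ≤ rs.foldl (fun best r => max best r) i := by
  induction rs generalizing i with
  | nil => exact h
  | cons r rest ih => exact ih _ (le_trans h (le_max_left _ _))

lemma foldl_max_append (rs : List Int) (x i : Int) :
    (rs ++ [x]).foldl (fun best r => max best r) i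
      = max (rs.foldl (fun best r => max best r) i) x := by
  simp [List.foldl_append]

-- invariant relating A's (best, cur) fold to B's (runs, cur) fold:
-- best = max (max of runs) cur, with cur ≥ 0
lemma fold_rel (stones : List Int) (people : Int) :
    ∀ (b c : Int) (rs : List Int), 0 ≤ c →
    b = max (rs.foldl (fun best r => max best r) 0) c →
    (let ra := (stones.map (fun stone => stone - (people - 1))).foldl
        (fun (acc : Int × Int) stone =>
          if stone ≤ 0 then (max acc.1 (acc.2 + 1), acc.2 + 1) else (acc.1, 0)) (b, c)
     let rb := stones.foldl (fun (acc : List Int × Int) s =>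
          if s < people then (acc.1, acc.2 + 1)
          else if acc.2 ≠ 0 then (acc.1 ++ [acc.2], 0)
          else (acc.1, 0)) (rs, c)
     0 ≤ rb.2 ∧ ra.1 = max (rb.1.foldl (fun best r => max best r) 0) rb.2) := by
  induction stones with
  | nil => intro b c rs hc hb; exact ⟨hc, hb⟩
  | cons s rest ih =>
    intro b c rs hc hb
    simp only [List.map_cons, List.foldl_cons]
    by_cases h : s < people
    · rw [if_pos (by omega : s - (people - 1) ≤ 0), if_pos h]
      exact ih _ _ _ (by omega) (by omega)
    · rw [if_neg (by omega : ¬ s - (people - 1) ≤ 0), if_neg h]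
      by_cases hz : c ≠ 0
      · rw [if_pos hz]
        refine ih _ _ _ le_rfl ?_
        rw [foldl_max_append]
        have := foldl_max_nonneg rs 0 le_rfl
        omega
      · rw [if_neg hz]
        refine ih _ _ _ le_rfl ?_
        have := foldl_max_nonneg rs 0 le_rfl
        omega

lemma lowerboundK_eq (stones : List Int) (people : Int) :
    lowerboundK stones people = lowerboundK_alt stones people := by
  unfold lowerboundK lowerboundK_alt runLengths
  have h := fold_rel stones people 0 0 [] le_rfl (by simp)
  simp only [] at h ⊢
  obtain ⟨hc, hb⟩ := h
  set rb := stones.foldl (fun (acc : List Int × Int) s =>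
      if s < people then (acc.1, acc.2 + 1)
      else if acc.2 ≠ 0 then (acc.1 ++ [acc.2], 0)
      else (acc.1, 0)) ([], 0) with hrb
  by_cases hz : rb.2 ≠ 0
  · rw [if_pos hz, foldl_max_append]
    omega
  · rw [if_neg hz]
    have := foldl_max_nonneg rb.1 0 le_rfl
    omega

-- with enough fuel the while-loop equals A's recursion
lemma briLoop_eq (fuel : Nat) : ∀ (val lo hi : Int) (stones : List Int),
    (hi - lo).toNat ≤ fuel → briLoop fuel val lo hi stones = binRight val lo hi stones := by
  induction fuel with
  | zero =>
    intro val lo hi stones hle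
    rw [binRight, briLoop]
    rw [dif_neg (by omega)]
  | succ fuel ih =>
    intro val lo hi stones hle
    rw [binRight, briLoop]
    by_cases h : lo < hi
    · rw [if_pos h, dif_pos h]
      have hmid : lo ≤ PySem.Int.floordiv (lo + hi) 2 ∧ PySem.Int.floordiv (lo + hi) 2 < hi := by
        simp only [PySem.Int.floordiv, Int.fdiv_eq_ediv]; omega
      simp only [lowerboundK_eq]
      by_cases hv : val < lowerboundK_alt stones (PySem.Int.floordiv (lo + hi) 2)
      · rw [if_pos hv, if_pos hv]
        exact ih val lo _ stones (by omega)
      · rw [if_neg hv, if_neg hv]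
        exact ih val _ hi stones (by omega)
    · rw [if_neg h, dif_neg h]

-- ===== VERDICT (by name: the statement is the Claim_ definition above) =====
theorem binRight_spec : Claim_equal_binRight := by
  intro val left right stones _ _
  exact (briLoop_eq (right - left).toNat val left right stones le_rfl).symm
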